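-- pv_equiv track=rewrite | github.com/ShiliangTong/AoC2023 | Day14/countRocks.py | find_repeating_sublist
-- ===== SOURCE A (Python) =====
-- def find_repeating_sublist(lst):
--     length = len(lst)
--     for sublist_length in range(1, length // 2 + 1):
--         sublist = lst[:sublist_length]
--         if lst == sublist * (length // sublist_length) + sublist[:length % sublist_length]:
--             return 0, sublist
--     for i in range(1, length):
--         for sublist_length in range(1, (length - i) // 2 + 1):
--             sublist = lst[i:i+sublist_length]
--             remaining_list = lst[i:]
--             if remaining_list == sublist * ((length - i) // sublist_length) + sublist[:(length - i) % sublist_length]: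
--                 return i, sublist
--     return -1, []
-- ===== SOURCE B (Python) =====
-- def find_repeating_sublist(lst):
--     # Precompute, for each candidate period p, the least offset from which the
--     # whole suffix is p-periodic; then scan offsets with an O(1) inner test.
--     n = len(lst)
--     # start[p] = least i such that lst[j] == lst[j+p] for all i <= j < n-p
--     start = [0]
--     for p in range(1, n + 1):
--         m = 0
--         for j in range(n - p):
--             if lst[j] != lst[j + p]:
--                 m = j + 1
--         start.append(m)
--     for i in range(n):
--         for p in range(1, (n - i) // 2 + 1):
--             if start[p] <= i:
--                 return i, lst[i:i + p]
--     return -1, []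
-- ===== Notes on version B (the rewrite author's own statement) =====
-- stated objective: faster
-- what changed: B precomputes, in one quadratic pass per period, the least offset from which each candidate period makes the suffix periodic, so the offset/period scan tests a table entry in O(1) instead of rebuilding and comparing a repeated-sublist copy of the suffix for every (offset, period) pair.
import Mathlib
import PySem

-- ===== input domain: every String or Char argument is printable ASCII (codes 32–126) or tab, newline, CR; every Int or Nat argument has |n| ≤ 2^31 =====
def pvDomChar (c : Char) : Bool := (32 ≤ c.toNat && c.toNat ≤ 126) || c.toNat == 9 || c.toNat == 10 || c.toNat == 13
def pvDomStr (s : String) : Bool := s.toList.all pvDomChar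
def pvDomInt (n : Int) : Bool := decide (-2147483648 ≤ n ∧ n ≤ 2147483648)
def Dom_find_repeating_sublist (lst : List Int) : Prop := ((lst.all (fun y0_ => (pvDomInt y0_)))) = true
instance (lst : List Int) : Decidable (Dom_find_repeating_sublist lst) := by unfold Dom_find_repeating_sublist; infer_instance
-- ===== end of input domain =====

-- B replaces A's per-offset rebuild-and-compare scan (O(n^3)) by a precomputed table of the
-- least offset from which each candidate period works, making the inner test O(1); objective: faster.

-- ===== PORT A =====
def find_repeating_sublist (lst : List Int) : Int × List Int :=
  let length : Int := (lst.length : Int)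
  match (PySem.List.pyRange 1 (PySem.Int.floordiv length 2 + 1)).findSome? (fun sublist_length =>
      let sublist := PySem.List.slice lst none (some sublist_length)
      if lst = PySem.List.pyRepeat sublist (PySem.Int.floordiv length sublist_length)
               ++ PySem.List.slice sublist none (some (PySem.Int.mod length sublist_length))
      then some ((0 : Int), sublist) else none) with
  | some r => r
  | none =>
    match (PySem.List.pyRange 1 length).findSome? (fun i =>
        (PySem.List.pyRange 1 (PySem.Int.floordiv (length - i) 2 + 1)).findSome? (fun sublist_length =>
          let sublist := PySem.List.slice lst (some i) (some (i + sublist_length))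
          let remaining_list := PySem.List.slice lst (some i) none
          if remaining_list = PySem.List.pyRepeat sublist (PySem.Int.floordiv (length - i) sublist_length)
               ++ PySem.List.slice sublist none (some (PySem.Int.mod (length - i) sublist_length))
          then some (i, sublist) else none)) with
    | some r => r
    | none => ((-1 : Int), [])

-- ===== PORT B =====
-- indices j and j + p are always in range in Source B, so pyGetD's default is never read
def find_repeating_sublist_alt (lst : List Int) : Int × List Int :=
  let n : Int := (lst.length : Int)
  let start : List Int := (PySem.List.pyRange 1 (n + 1)).foldl (fun acc p =>
      let m := (PySem.List.pyRange 0 (n - p)).foldl (fun m j =>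
          if PySem.List.pyGetD lst j 0 ≠ PySem.List.pyGetD lst (j + p) 0 then j + 1 else m) 0
      acc ++ [m]) [0]
  match (PySem.List.pyRange 0 n).findSome? (fun i =>
      (PySem.List.pyRange 1 (PySem.Int.floordiv (n - i) 2 + 1)).findSome? (fun p =>
        if PySem.List.pyGetD start p 0 ≤ i then some (i, PySem.List.slice lst (some i) (some (i + p))) else none)) with
  | some r => r
  | none => ((-1 : Int), [])

-- ===== PRECONDITION & SPEC =====
def Spec_find_repeating_sublist (lst : List Int) (out : Int × List Int) : Prop := out = find_repeating_sublist_alt lst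
instance (lst : List Int) (out : Int × List Int) : Decidable (Spec_find_repeating_sublist lst out) := by unfold Spec_find_repeating_sublist; infer_instance

-- ===== CLAIM (what is proved, stated in full; the proofs are below) =====
def Claim_equal_find_repeating_sublist : Prop := ∀ (lst : List Int), Dom_find_repeating_sublist lst → Spec_find_repeating_sublist lst (find_repeating_sublist lst)

-- ===== LEMMAS AND PROOFS =====

theorem pvRep_length (t : List Int) (k r : Nat) :
    ((List.replicate k t).flatten ++ t.take r).length = k * t.length + min r t.length := by
  simp [List.length_flatten, List.map_replicate]

theorem pvRep_getD (t : List Int) (p k r : Nat) (ht : t.length = p) (hr : r ≤ p) (j : Nat)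
    (hj : j < k * p + r) :
    ((List.replicate k t).flatten ++ t.take r).getD j 0 = t.getD (j % p) 0 := by
  induction k generalizing j with
  | zero =>
    simp only [Nat.zero_mul, Nat.zero_add] at hj
    simp only [List.replicate_zero, List.flatten_nil, List.nil_append]
    have hjp : j < p := lt_of_lt_of_le hj hr
    rw [Nat.mod_eq_of_lt hjp]
    simp [List.getD, hj]
  | succ k ih =>
    simp only [List.replicate_succ, List.flatten_cons, List.append_assoc]
    by_cases hjp : j < p
    · rw [Nat.mod_eq_of_lt hjp]
      simp [List.getD, List.getElem?_append, ht, hjp]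
    · push_neg at hjp
      rw [Nat.succ_mul] at hj
      have h1 : j - p < k * p + r := by omega
      have h2 : (j - p) % p = j % p := by
        conv_rhs => rw [← Nat.sub_add_cancel hjp]
        rw [Nat.add_mod_right]
      rw [← h2, ← ih (j - p) h1]
      simp [List.getD, List.getElem?_append, ht, Nat.not_lt.mpr hjp]

theorem pvForm_iff (s : List Int) (p : Nat) (hp : 1 ≤ p) (hpm : p ≤ s.length) :
    (s = (List.replicate (s.length / p) (s.take p)).flatten ++ (s.take p).take (s.length % p))
      ↔ (∀ j : Nat, j + p < s.length → s.getD j 0 = s.getD (j + p) 0) := by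
  set t := s.take p with htdef
  have ht : t.length = p := by simp [htdef, hpm]
  have hr : s.length % p < p := Nat.mod_lt _ (by omega)
  have hkr : s.length / p * p + s.length % p = s.length := Nat.div_add_mod' _ _
  have htg : ∀ q, q < p → t.getD q 0 = s.getD q 0 := by
    intro q hq
    simp [htdef, List.getD, hq]
  constructor
  · intro h j hj
    have h1 : s.getD j 0 = t.getD (j % p) 0 := by
      conv_lhs => rw [h]
      exact pvRep_getD t p _ _ ht (le_of_lt hr) j (by omega)
    have h2 : s.getD (j + p) 0 = t.getD ((j + p) % p) 0 := by
      conv_lhs => rw [h]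
      exact pvRep_getD t p _ _ ht (le_of_lt hr) (j + p) (by omega)
    rw [h1, h2, Nat.add_mod_right, htg _ (Nat.mod_lt _ (by omega))]
  · intro h
    have key : ∀ j, j < s.length → s.getD j 0 = s.getD (j % p) 0 := by
      intro j
      induction j using Nat.strong_induction_on with
      | _ j ih =>
        intro hj
        by_cases hjp : j < p
        · rw [Nat.mod_eq_of_lt hjp]
        · push_neg at hjp
          have e1 : s.getD (j - p) 0 = s.getD j 0 := by
            have := h (j - p) (by omega)
            rwa [Nat.sub_add_cancel hjp] at this
          have e2 : s.getD (j - p) 0 = s.getD ((j - p) % p) 0 := ih (j - p) (by omega) (by omega)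
          have e3 : (j - p) % p = j % p := by
            conv_rhs => rw [← Nat.sub_add_cancel hjp]
            rw [Nat.add_mod_right]
          rw [← e1, e2, e3]
    have hlen : ((List.replicate (s.length / p) t).flatten ++ t.take (s.length % p)).length = s.length := by
      rw [pvRep_length, ht, Nat.min_eq_left (le_of_lt hr)]
      exact hkr
    apply List.ext_getElem (by rw [hlen])
    intro n h1 h2
    have hn : n < s.length := h1
    have g1 : s[n] = s.getD n 0 := (List.getD_eq_getElem s 0 hn).symm
    have g2 : ((List.replicate (s.length / p) t).flatten ++ t.take (s.length % p))[n]
        = ((List.replicate (s.length / p) t).flatten ++ t.take (s.length % p)).getD n 0 :=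
      (List.getD_eq_getElem _ 0 h2).symm
    rw [g1, g2, pvRep_getD t p _ _ ht (le_of_lt hr) n (by omega), htg _ (Nat.mod_lt _ (by omega)),
      key n hn]

theorem pvG (lst : List Int) (p : Nat) (i : Int) :
    ∀ (t : Nat) (a : Int), a ≤ 0 →
      (((List.range t).foldl (fun m (j : Nat) =>
          if lst.getD j 0 ≠ lst.getD (j + p) 0 then (j : Int) + 1 else m) a ≤ i)
        ↔ (a ≤ i ∧ ∀ j < t, i ≤ (j : Int) → lst.getD j 0 = lst.getD (j + p) 0)) := by
  intro t
  induction t with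
  | zero => intro a ha; simp
  | succ t ih =>
    intro a ha
    rw [List.range_succ, List.foldl_append]
    simp only [List.foldl_cons, List.foldl_nil]
    by_cases hmis : lst.getD t 0 ≠ lst.getD (t + p) 0
    · rw [if_pos hmis]
      constructor
      · intro hle
        refine ⟨by omega, ?_⟩
        intro j hj hij
        exfalso
        have : (j : Int) < i := by
          have : (j : Int) ≤ (t : Int) := by exact_mod_cast Nat.lt_succ_iff.mp hj
          omega
        omega
      · rintro ⟨-, hall⟩
        have : ¬ (i ≤ (t : Int)) := fun hit => hmis (hall t (Nat.lt_succ_self t) hit)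
        omega
    · rw [if_neg hmis]
      push_neg at hmis
      rw [ih a ha]
      constructor
      · rintro ⟨h1, h2⟩
        exact ⟨h1, fun j hj hij => by
          rcases Nat.lt_succ_iff_lt_or_eq.mp hj with h | h
          · exact h2 j h hij
          · subst h; exact hmis⟩
      · rintro ⟨h1, h2⟩
        exact ⟨h1, fun j hj hij => h2 j (Nat.lt_succ_of_lt hj) hij⟩

theorem pvFold_le_iff (lst : List Int) (p : Nat) (i : Int) (hi : 0 ≤ i) :
    ((PySem.List.pyRange 0 ((lst.length : Int) - (p : Int))).foldl (fun m j =>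
        if PySem.List.pyGetD lst j 0 ≠ PySem.List.pyGetD lst (j + (p : Int)) 0 then j + 1 else m) 0 ≤ i)
      ↔ (∀ j : Nat, i ≤ (j : Int) → j + p < lst.length → lst.getD j 0 = lst.getD (j + p) 0) := by
  by_cases hpN : p ≤ lst.length
  · have hcast : (lst.length : Int) - (p : Int) = ((lst.length - p : Nat) : Int) := by
      push_cast [hpN]; ring
    rw [hcast, PySem.List.pyRange_zero_natCast, List.foldl_map]
    have hfun : ∀ (m : Int) (j : Nat), j < lst.length - p →
        (if PySem.List.pyGetD lst (j : Int) 0 ≠ PySem.List.pyGetD lst ((j : Int) + (p : Int)) 0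
          then (j : Int) + 1 else m)
        = (if lst.getD j 0 ≠ lst.getD (j + p) 0 then (j : Int) + 1 else m) := by
      intro m j hj
      have e1 : PySem.List.pyGetD lst (j : Int) 0 = lst.getD j 0 := by
        rw [PySem.List.pyGetD_of_nonneg lst 0 (by positivity)]; simp
      have e2 : PySem.List.pyGetD lst ((j : Int) + (p : Int)) 0 = lst.getD (j + p) 0 := by
        rw [PySem.List.pyGetD_of_nonneg lst 0 (by positivity)]
        have ee : ((j : Int) + (p : Int)).toNat = j + p := by omega
        simp [ee]
      rw [e1, e2]
    have hcongr : (List.range (lst.length - p)).foldl (fun m (j : Nat) =>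
        if PySem.List.pyGetD lst (j : Int) 0 ≠ PySem.List.pyGetD lst ((j : Int) + (p : Int)) 0
          then (j : Int) + 1 else m) 0
        = (List.range (lst.length - p)).foldl (fun m (j : Nat) =>
            if lst.getD j 0 ≠ lst.getD (j + p) 0 then (j : Int) + 1 else m) 0 := by
      apply PySem.List.foldl_congr_mem
      intro acc x hx
      exact hfun acc x (List.mem_range.mp hx)
    rw [hcongr, pvG lst p i (lst.length - p) 0 le_rfl]
    constructor
    · rintro ⟨-, h⟩ j hij hjp
      exact h j (by omega) hij
    · intro h
      exact ⟨hi, fun j hj hij => h j hij (by omega)⟩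
  · push_neg at hpN
    have : (lst.length : Int) - (p : Int) ≤ 0 := by
      have : (lst.length : Int) < (p : Int) := by exact_mod_cast hpN
      omega
    rw [PySem.List.pyRange_one_eq_nil this]
    simp only [List.foldl_nil]
    constructor
    · intro _ j _ hjp; omega
    · intro _; exact hi

def pvStart (lst : List Int) : List Int :=
  (PySem.List.pyRange 1 ((lst.length : Int) + 1)).foldl (fun acc p =>
      let m := (PySem.List.pyRange 0 ((lst.length : Int) - p)).foldl (fun m j =>
          if PySem.List.pyGetD lst j 0 ≠ PySem.List.pyGetD lst (j + p) 0 then j + 1 else m) 0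
      acc ++ [m]) [0]

theorem pvStart_getD (lst : List Int) (p : Nat) (hp : 1 ≤ p) (hpN : p ≤ lst.length) :
    PySem.List.pyGetD (pvStart lst) (p : Int) 0 =
      (PySem.List.pyRange 0 ((lst.length : Int) - (p : Int))).foldl (fun m j =>
          if PySem.List.pyGetD lst j 0 ≠ PySem.List.pyGetD lst (j + (p : Int)) 0 then j + 1 else m) 0 := by
  unfold pvStart
  rw [PySem.List.foldl_append_singleton_eq_map (fun q =>
    (PySem.List.pyRange 0 ((lst.length : Int) - q)).foldl (fun m j =>
        if PySem.List.pyGetD lst j 0 ≠ PySem.List.pyGetD lst (j + q) 0 then j + 1 else m) 0)]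
  rw [PySem.List.pyGetD_of_nonneg _ 0 (by positivity)]
  have hpt : ((p : Int)).toNat = p := by omega
  rw [hpt]
  have hlen : (PySem.List.pyRange 1 ((lst.length : Int) + 1)).length = lst.length := by
    rw [PySem.List.length_pyRange_one]; omega
  have hidx : p - 1 < (PySem.List.pyRange 1 ((lst.length : Int) + 1)).length := by omega
  have hget : (PySem.List.pyRange 1 ((lst.length : Int) + 1))[p-1] = (p : Int) := by
    rw [PySem.List.getElem_pyRange_one]
    omega
  have hsplit : ([(0 : Int)] ++ (PySem.List.pyRange 1 ((lst.length : Int) + 1)).map (fun q =>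
      (PySem.List.pyRange 0 ((lst.length : Int) - q)).foldl (fun m j =>
          if PySem.List.pyGetD lst j 0 ≠ PySem.List.pyGetD lst (j + q) 0 then j + 1 else m) 0)).getD p 0
      = ((PySem.List.pyRange 1 ((lst.length : Int) + 1)).map (fun q =>
      (PySem.List.pyRange 0 ((lst.length : Int) - q)).foldl (fun m j =>
          if PySem.List.pyGetD lst j 0 ≠ PySem.List.pyGetD lst (j + q) 0 then j + 1 else m) 0)).getD (p - 1) 0 := by
    rcases p with _ | p'
    · omega
    · simp [List.getD]
  rw [hsplit, List.getD, List.getElem?_map]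
  rw [List.getElem?_eq_getElem (by simpa [hlen] using hidx), hget]
  simp

theorem pvCond_iff (lst : List Int) (i p : Nat) (hp : 1 ≤ p) (hpm : i + p ≤ lst.length) :
    (PySem.List.slice lst (some (i : Int)) none =
       PySem.List.pyRepeat (PySem.List.slice lst (some (i : Int)) (some ((i : Int) + (p : Int))))
           (PySem.Int.floordiv ((lst.length : Int) - (i : Int)) (p : Int))
         ++ PySem.List.slice (PySem.List.slice lst (some (i : Int)) (some ((i : Int) + (p : Int)))) none
              (some (PySem.Int.mod ((lst.length : Int) - (i : Int)) (p : Int))))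
      ↔ PySem.List.pyGetD (pvStart lst) (p : Int) 0 ≤ (i : Int) := by
  have hiN : i ≤ lst.length := by omega
  have hpN : p ≤ lst.length := by omega
  have hcast : (lst.length : Int) - (i : Int) = ((lst.length - i : Nat) : Int) := by
    push_cast [hiN]; ring
  set s := lst.drop i with hs
  have hsl : s.length = lst.length - i := by simp [hs]
  have hps : p ≤ s.length := by omega
  rw [PySem.List.slice_from_natCast, PySem.List.slice_natCast_add, hcast,
    PySem.Int.floordiv_natCast, PySem.Int.mod_natCast, PySem.List.slice_to_natCast]
  have htake : List.take p (List.drop i lst) = s.take p := by rw [hs]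
  rw [htake]
  have hrep : PySem.List.pyRepeat (s.take p) (((lst.length - i) / p : Nat) : Int)
      = (List.replicate ((lst.length - i) / p) (s.take p)).flatten := by
    simp only [PySem.List.pyRepeat, Int.toNat_natCast]
  rw [hrep]
  have hform := pvForm_iff s p hp hps
  rw [hsl] at hform
  rw [show List.drop i lst = s from rfl, hform]
  rw [pvStart_getD lst p hp hpN, pvFold_le_iff lst p (i : Int) (by positivity)]
  have hbridge : ∀ j' : Nat, s.getD j' 0 = lst.getD (i + j') 0 := by
    intro j'
    simp [hs, List.getD, List.getElem?_drop]
  constructor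
  · intro h j hij hjp
    have hji : i ≤ j := by exact_mod_cast hij
    have h2 := h (j - i) (by omega)
    rw [hbridge, hbridge] at h2
    rw [show i + (j - i) = j by omega, show i + (j - i + p) = j + p by omega] at h2
    exact h2
  · intro h j' hj'
    have h2 := h (i + j') (by exact_mod_cast Nat.le_add_right i j') (by omega)
    rw [hbridge, hbridge, show i + (j' + p) = i + j' + p by omega]
    exact h2

def pvAfirst (lst : List Int) : Option (Int × List Int) :=
  (PySem.List.pyRange 1 (PySem.Int.floordiv (lst.length : Int) 2 + 1)).findSome? (fun sublist_length =>
      let sublist := PySem.List.slice lst none (some sublist_length)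
      if lst = PySem.List.pyRepeat sublist (PySem.Int.floordiv (lst.length : Int) sublist_length)
               ++ PySem.List.slice sublist none (some (PySem.Int.mod (lst.length : Int) sublist_length))
      then some ((0 : Int), sublist) else none)

def pvAinner (lst : List Int) (i : Int) : Option (Int × List Int) :=
  (PySem.List.pyRange 1 (PySem.Int.floordiv ((lst.length : Int) - i) 2 + 1)).findSome? (fun sublist_length =>
      let sublist := PySem.List.slice lst (some i) (some (i + sublist_length))
      let remaining_list := PySem.List.slice lst (some i) none
      if remaining_list = PySem.List.pyRepeat sublist (PySem.Int.floordiv ((lst.length : Int) - i) sublist_length)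
               ++ PySem.List.slice sublist none (some (PySem.Int.mod ((lst.length : Int) - i) sublist_length))
      then some (i, sublist) else none)

def pvBinner (lst : List Int) (i : Int) : Option (Int × List Int) :=
  (PySem.List.pyRange 1 (PySem.Int.floordiv ((lst.length : Int) - i) 2 + 1)).findSome? (fun p =>
      if PySem.List.pyGetD (pvStart lst) p 0 ≤ i then some (i, PySem.List.slice lst (some i) (some (i + p))) else none)

theorem pvA_eq (lst : List Int) : find_repeating_sublist lst =
    (match pvAfirst lst with
     | some r => r
     | none =>
       match (PySem.List.pyRange 1 (lst.length : Int)).findSome? (fun i => pvAinner lst i) with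
       | some r => r
       | none => ((-1 : Int), [])) := by
  unfold find_repeating_sublist pvAfirst pvAinner
  rfl

theorem pvB_eq (lst : List Int) : find_repeating_sublist_alt lst =
    (match (PySem.List.pyRange 0 (lst.length : Int)).findSome? (fun i => pvBinner lst i) with
     | some r => r
     | none => ((-1 : Int), [])) := by
  unfold find_repeating_sublist_alt pvBinner pvStart
  rfl

theorem pvFindSome?_congr {α β : Type} (l : List α) (f g : α → Option β)
    (h : ∀ a ∈ l, f a = g a) : l.findSome? f = l.findSome? g := by
  induction l with
  | nil => rfl
  | cons a l ih =>
    rw [List.findSome?_cons, List.findSome?_cons, h a (List.mem_cons_self),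
      ih (fun x hx => h x (List.mem_cons_of_mem a hx))]

theorem pvInner_eq (lst : List Int) (i : Nat) (hi : i < lst.length) :
    pvAinner lst (i : Int) = pvBinner lst (i : Int) := by
  unfold pvAinner pvBinner
  apply pvFindSome?_congr
  intro p hp
  rw [PySem.List.mem_pyRange_one] at hp
  obtain ⟨hp1, hp2⟩ := hp
  have hiN : i ≤ lst.length := le_of_lt hi
  have hcast : (lst.length : Int) - (i : Int) = ((lst.length - i : Nat) : Int) := by
    push_cast [hiN]; ring
  rw [hcast] at hp2
  have hfd : PySem.Int.floordiv ((lst.length - i : Nat) : Int) 2 = (((lst.length - i) / 2 : Nat) : Int) := by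
    exact_mod_cast PySem.Int.floordiv_natCast (lst.length - i) 2
  rw [hfd] at hp2
  set pN := p.toNat with hpNdef
  have hpcast : p = (pN : Int) := by omega
  have hp1' : 1 ≤ pN := by omega
  have hple' : pN ≤ (lst.length - i) / 2 := by omega
  have hsum : i + pN ≤ lst.length := by
    have := Nat.div_le_self (lst.length - i) 2
    omega
  rw [hpcast]
  exact if_congr (pvCond_iff lst i pN hp1' hsum) rfl rfl

theorem pvFirst_eq (lst : List Int) : pvAfirst lst = pvBinner lst 0 := by
  unfold pvAfirst pvBinner
  rw [show (lst.length : Int) - 0 = (lst.length : Int) by ring]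
  apply pvFindSome?_congr
  intro p hp
  rw [PySem.List.mem_pyRange_one] at hp
  obtain ⟨hp1, hp2⟩ := hp
  have hfd : PySem.Int.floordiv ((lst.length : Nat) : Int) 2 = ((lst.length / 2 : Nat) : Int) := by
    exact_mod_cast PySem.Int.floordiv_natCast lst.length 2
  rw [hfd] at hp2
  set pN := p.toNat with hpNdef
  have hpcast : p = (pN : Int) := by omega
  have hp1' : 1 ≤ pN := by omega
  have hsum : 0 + pN ≤ lst.length := by
    have h1 : pN ≤ lst.length / 2 := by omega
    have := Nat.div_le_self lst.length 2
    omega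
  have hc := pvCond_iff lst 0 pN hp1' hsum
  simp only [Nat.cast_zero, sub_zero, zero_add, PySem.List.slice_zero_start,
    PySem.List.slice_none_none] at hc
  rw [hpcast]
  simp only [zero_add, PySem.List.slice_zero_start]
  exact if_congr hc rfl rfl

theorem pv_main (lst : List Int) : find_repeating_sublist lst = find_repeating_sublist_alt lst := by
  by_cases hN : lst = []
  · subst hN; decide
  · have hNpos : 0 < lst.length := List.length_pos_iff.mpr hN
    rw [pvA_eq, pvB_eq]
    have hcons : PySem.List.pyRange 0 (lst.length : Int) = 0 :: PySem.List.pyRange 1 (lst.length : Int) := by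
      have h := PySem.List.pyRange_one_cons (a := 0) (b := (lst.length : Int)) (by exact_mod_cast hNpos)
      simpa using h
    rw [hcons, List.findSome?_cons]
    have hinner : (PySem.List.pyRange 1 (lst.length : Int)).findSome? (fun i => pvAinner lst i)
        = (PySem.List.pyRange 1 (lst.length : Int)).findSome? (fun i => pvBinner lst i) := by
      apply pvFindSome?_congr
      intro a ha
      rw [PySem.List.mem_pyRange_one] at ha
      have hae : a = ((a.toNat : Nat) : Int) := by omega
      rw [hae]
      exact pvInner_eq lst a.toNat (by omega)
    rw [hinner, ← pvFirst_eq]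
    cases pvAfirst lst <;>
      cases (PySem.List.pyRange 1 (lst.length : Int)).findSome? (fun i => pvBinner lst i) <;> rfl

-- ===== VERDICT (by name: the statement is the Claim_ definition above) =====
theorem find_repeating_sublist_spec : Claim_equal_find_repeating_sublist := by
  intro lst _
  show find_repeating_sublist lst = find_repeating_sublist_alt lst
  exact pv_main lst
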